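-- pv_equiv track=rewrite | github.com/miliar/Code_Jam_Webscraper | Solutions_python/Problem_155/1288.py | solve
-- ===== SOURCE A (Python) =====
-- def solve(n):
-- 	cont = 0
-- 	a = 0
-- 	for i in range(0,len(n)):
-- 		if cont < i:
-- 			a += i - cont
-- 			cont += i - cont
-- 		cont += n[i]
--
-- 	return a
-- ===== SOURCE B (Python) =====
-- def solve(n):
--     # Backward pass: track the suffix sum and the best value of i + suffix(i);
--     # the answer is that maximum minus the total sum (0 for an empty list).
--     suffix = 0
--     best = None
--     i = len(n) - 1
--     for x in reversed(n):
--         suffix += x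
--         cand = i + suffix
--         if best is None or cand > best:
--             best = cand
--         i -= 1
--     return best - suffix if best is not None else 0
-- ===== Notes on version B (the rewrite author's own statement) =====
-- stated objective: alternative
-- what changed: Replaces A's forward loop that conditionally boosts a running pointer `cont` and accumulates the gaps with a backward traversal over the reversed list that maintains a suffix sum and the maximum of i + suffix(i), returning that maximum minus the total sum (0 for empty input).
import Mathlib
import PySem

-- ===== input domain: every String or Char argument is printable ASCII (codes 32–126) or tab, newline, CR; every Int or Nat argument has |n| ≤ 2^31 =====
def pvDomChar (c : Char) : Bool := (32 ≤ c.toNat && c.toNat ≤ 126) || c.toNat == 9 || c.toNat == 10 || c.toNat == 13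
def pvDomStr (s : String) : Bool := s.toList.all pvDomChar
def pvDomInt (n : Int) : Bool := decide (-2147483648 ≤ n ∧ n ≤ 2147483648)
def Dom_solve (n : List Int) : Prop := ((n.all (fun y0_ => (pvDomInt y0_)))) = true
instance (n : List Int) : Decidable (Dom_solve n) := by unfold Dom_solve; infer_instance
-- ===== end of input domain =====

-- B replaces A's forward conditional catch-up loop by a backward traversal: a suffix sum and the max of i + suffix(i), the answer being that max minus the total sum.

-- ===== PORT A =====
-- for i in range(0, len(n)): if cont < i: a += i-cont; cont += i-cont; then cont += n[i]
-- (n[i] via pyGetD with default 0; i ∈ range(len n) so the index is always in range)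
def solve (n : List Int) : Int :=
  ((PySem.List.pyRange 0 (n.length : Int) 1).foldl
    (fun st i =>
      let st := if st.1 < i then (st.1 + (i - st.1), st.2 + (i - st.1)) else st
      (st.1 + PySem.List.pyGetD n i 0, st.2))
    (0, 0)).2

-- ===== PORT B =====
-- suffix = 0; best = None; i = len(n)-1
-- for x in reversed(n): suffix += x; cand = i + suffix; if best is None or cand > best: best = cand; i -= 1
-- return best - suffix if best is not None else 0
def solve_alt (n : List Int) : Int :=
  let st := n.reverse.foldl
    (fun (st : Int × Int × Option Int) x =>
      let suffix := st.2.1 + x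
      let cand := st.1 + suffix
      let best : Option Int :=
        match st.2.2 with
        | none => some cand
        | some b => if cand > b then some cand else some b
      (st.1 - 1, suffix, best))
    ((n.length : Int) - 1, 0, none)
  match st.2.2 with
  | some b => b - st.2.1
  | none => 0

-- ===== PRECONDITION & SPEC =====
def Spec_solve (n : List Int) (out : Int) : Prop := out = solve_alt n
instance (n : List Int) (out : Int) : Decidable (Spec_solve n out) := by unfold Spec_solve; infer_instance

-- ===== CLAIM (what is proved, stated in full; the proofs are below) =====
def Claim_equal_solve : Prop := ∀ (n : List Int), Dom_solve n → Spec_solve n (solve n)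

-- ===== LEMMAS AND PROOFS =====

-- deficit candidates i - prefix_i starting at index k, prefix s
def pvCands (k s : Int) : List Int → List Int
  | [] => []
  | x :: t => (k - s) :: pvCands (k + 1) (s + x) t

-- B's backward recursion, peeled from the front (the head is processed last)
def pvBrec (k : Int) : List Int → Int × Option Int
  | [] => (0, none)
  | x :: t =>
    let p := pvBrec (k + 1) t
    let cand := k + (p.1 + x)
    (p.1 + x,
      match p.2 with
      | none => some cand
      | some b => if cand > b then some cand else some b)

-- Invariant: A's state is (s + ans, ans) when the forward-max fold's state is (s, ans).
lemma pv_key (g : Int → Int) (l : List Int) : ∀ (s a : Int),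
    l.foldl
      (fun st i =>
        let st := if st.1 < i then (st.1 + (i - st.1), st.2 + (i - st.1)) else st
        (st.1 + g i, st.2))
      (s + a, a)
    = ((l.foldl (fun st i => (st.1 + g i, max st.2 (i - st.1))) (s, a)).1
        + (l.foldl (fun st i => (st.1 + g i, max st.2 (i - st.1))) (s, a)).2,
       (l.foldl (fun st i => (st.1 + g i, max st.2 (i - st.1))) (s, a)).2) := by
  induction l with
  | nil => intro s a; simp
  | cons i l ih =>
    intro s a
    simp only [List.foldl_cons]
    by_cases h : s + a < i
    · rw [if_pos h]
      have hm : max a (i - s) = i - s := by omega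
      rw [hm]
      have e : ((s + a + (i - (s + a)), a + (i - (s + a))).1 + g i,
               (s + a + (i - (s + a)), a + (i - (s + a))).2)
             = ((s + g i) + (i - s), i - s) := by
        simp only [Prod.mk.injEq]; constructor <;> ring
      rw [e]; exact ih (s + g i) (i - s)
    · rw [if_neg h]
      have hm : max a (i - s) = a := by omega
      rw [hm]
      have e : ((s + a, a).1 + g i, (s + a, a).2) = ((s + g i) + a, a) := by
        simp only [Prod.mk.injEq]; exact ⟨by ring, trivial⟩
      rw [e]; exact ih (s + g i) a

-- The forward-max fold over enumerate computes the max over the deficit candidates.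
lemma pv_fwd_char (l : List Int) : ∀ (k s a : Int),
    ((PySem.List.enumerate l k).foldl
      (fun st p => (st.1 + p.2, max st.2 (p.1 - st.1))) (s, a)).2
    = List.foldl max a (pvCands k s l) := by
  induction l with
  | nil => intro k s a; simp [pvCands, PySem.List.enumerate_nil]
  | cons x t ih =>
    intro k s a
    rw [PySem.List.enumerate_cons]
    simp only [List.foldl_cons, pvCands]
    exact ih (k + 1) (s + x) (max a (k - s))

lemma pv_brec_fst (l : List Int) : ∀ (k : Int), (pvBrec k l).1 = l.sum := by
  induction l with
  | nil => intro k; simp [pvBrec]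
  | cons x t ih => intro k; simp [pvBrec, ih]; ring

-- Relation between the candidates' running max and the backward recursion.
lemma pv_brec_cands (l : List Int) : ∀ (k s a : Int),
    List.foldl max a (pvCands k s l)
    = match (pvBrec k l).2 with
      | none => a
      | some b => max a (b - s - l.sum) := by
  induction l with
  | nil => intro k s a; simp [pvCands, pvBrec]
  | cons x t ih =>
    intro k s a
    simp only [pvCands, List.foldl_cons]
    rw [ih (k + 1) (s + x) (max a (k - s))]
    cases h : (pvBrec (k + 1) t).2 with
    | none =>
      simp [pvBrec, h, List.sum_cons, pv_brec_fst]
      have : k + (t.sum + x) - s - (x + t.sum) = k - s := by ring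
      rw [this]
    | some b =>
      simp [pvBrec, h, List.sum_cons, pv_brec_fst]
      by_cases hc : k + (t.sum + x) > b
      · rw [if_pos hc]
        simp only [Option.some.injEq]
        have e : k + (t.sum + x) - s - (x + t.sum) = k - s := by ring
        rw [e, max_eq_left (by omega : b - (s + x) - t.sum ≤ k - s)]
      · rw [if_neg hc]
        simp only [Option.some.injEq]
        rw [max_eq_right (by omega : k - s ≤ b - (s + x) - t.sum)]
        have e : b - (s + x) - t.sum = b - s - (x + t.sum) := by ring
        rw [e]

-- For nonempty lists the backward best exists and is at least k + sum.
lemma pv_brec_ge (x : Int) (t : List Int) (k : Int) :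
    ∃ b, (pvBrec k (x :: t)).2 = some b ∧ k + (x :: t).sum ≤ b := by
  have hf := pv_brec_fst t (k + 1)
  cases h : (pvBrec (k + 1) t).2 with
  | none =>
    refine ⟨k + ((pvBrec (k + 1) t).1 + x), by simp [pvBrec, h], ?_⟩
    rw [hf]; simp only [List.sum_cons]; omega
  | some b' =>
    by_cases hc : k + ((pvBrec (k + 1) t).1 + x) > b'
    · refine ⟨k + ((pvBrec (k + 1) t).1 + x), by simp [pvBrec, h, hc], ?_⟩
      rw [hf]; simp only [List.sum_cons]; omega
    · refine ⟨b', by simp [pvBrec, h, hc], ?_⟩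
      rw [hf] at hc; simp only [List.sum_cons]; omega

-- B's foldl over the reversed list equals the backward recursion.
lemma pv_bfold (l : List Int) : ∀ (k : Int),
    l.reverse.foldl
      (fun (st : Int × Int × Option Int) x =>
        let suffix := st.2.1 + x
        let cand := st.1 + suffix
        let best : Option Int :=
          match st.2.2 with
          | none => some cand
          | some b => if cand > b then some cand else some b
        (st.1 - 1, suffix, best))
      (k + (l.length : Int) - 1, 0, none)
    = (k - 1, pvBrec k l) := by
  induction l with
  | nil => intro k; simp [pvBrec]
  | cons x t ih =>
    intro k
    rw [List.reverse_cons, List.foldl_append]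
    have e : k + ((x :: t).length : Int) - 1 = (k + 1) + (t.length : Int) - 1 := by
      push_cast [List.length_cons]; ring
    rw [e, ih (k + 1)]
    simp only [List.foldl_cons, List.foldl_nil, pvBrec]
    have : k + 1 - 1 = k := by ring
    rw [this]

-- solve equals the forward-max fold over enumerate.
lemma pv_solve_fwd (n : List Int) :
    solve n = ((PySem.List.enumerate n 0).foldl
      (fun st p => (st.1 + p.2, max st.2 (p.1 - st.1))) ((0 : Int), (0 : Int))).2 := by
  unfold solve
  rw [PySem.List.enumerate_eq_map_pyRange (d := 0), List.foldl_map]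
  have := pv_key (fun j => PySem.List.pyGetD n j 0) (PySem.List.pyRange 0 (n.length : Int) 1) 0 0
  simp only [add_zero] at this
  simp only [PySem.List.len]
  rw [this]

theorem solve_spec : Claim_equal_solve := by
  intro n _
  unfold Spec_solve solve_alt
  rw [pv_solve_fwd, pv_fwd_char n 0 0 0, pv_brec_cands n 0 0 0]
  have hb := pv_bfold n 0
  simp only [zero_add] at hb
  rw [hb]
  cases n with
  | nil => simp [pvBrec]
  | cons x t =>
    obtain ⟨b, hb2, hge⟩ := pv_brec_ge x t 0
    simp [hb2, pv_brec_fst]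
    simp only [zero_add, List.sum_cons] at hge
    omega
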